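-- pv_equiv track=rewrite | github.com/maelbru/serious-game-cyber-kill-chain-analyzer | backend/utils/helpers.py | sanitize_log_data
-- ===== SOURCE A (Python) =====
-- def sanitize_log_data(log_data):
--     """
--     Rimuove informazioni sensibili dal log prima di inviarlo al frontend
--     Questo previene che il client veda la risposta corretta prima di rispondere
--
--     Args:
--         log_data (dict): Dati completi del log dal database
--
--     Returns:
--         dict: Log pulito senza informazioni che rovinerebbero il gioco
--     """
--     if not isinstance(log_data, dict):
--         return {}
--
--     # Campi che contengono spoiler e vanno rimossi
--     sensitive_fields = ['explanation', 'phase', 'indicators']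
--
--     # Crea una copia pulita del log
--     sanitized = {}
--     for key, value in log_data.items():
--         if key not in sensitive_fields:
--             sanitized[key] = value
--
--     return sanitized
-- ===== SOURCE B (Python) =====
-- def sanitize_log_data(log_data):
--     """Copy the dict and pop the fixed blacklist, instead of scanning every item."""
--     if not isinstance(log_data, dict):
--         return {}
--     sanitized = dict(log_data)
--     for field in ['explanation', 'phase', 'indicators']:
--         sanitized.pop(field, None)
--     return sanitized
-- ===== Notes on version B (the rewrite author's own statement) =====
-- stated objective: simpler
-- what changed: B copies the whole dict once and pops the three blacklisted fields, instead of iterating every item and testing each key against the blacklist.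
import Mathlib
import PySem

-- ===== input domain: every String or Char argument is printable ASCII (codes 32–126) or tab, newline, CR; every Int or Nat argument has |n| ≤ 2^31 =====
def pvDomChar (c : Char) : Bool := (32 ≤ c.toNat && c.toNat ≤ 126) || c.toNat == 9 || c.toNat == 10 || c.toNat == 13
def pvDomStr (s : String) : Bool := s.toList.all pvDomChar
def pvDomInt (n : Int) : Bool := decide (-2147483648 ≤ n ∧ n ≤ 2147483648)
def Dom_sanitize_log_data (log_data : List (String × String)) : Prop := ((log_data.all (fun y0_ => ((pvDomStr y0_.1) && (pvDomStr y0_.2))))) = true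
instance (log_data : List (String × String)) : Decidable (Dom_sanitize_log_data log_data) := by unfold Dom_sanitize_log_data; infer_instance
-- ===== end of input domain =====

-- B copies the dict once and pops the three blacklisted fields instead of scanning every
-- item against the blacklist (objective: simpler; the Python isinstance guard is vacuous
-- under the type convention, the argument always being a dict as an association list).

-- ===== PORT A =====
-- builds a fresh dict, inserting only the keys that are not blacklisted
def sanitize_log_data (log_data : List (String × String)) : List (String × String) :=
  let sensitive_fields : List String := ["explanation", "phase", "indicators"]
  let sanitized : PySem.Dict String String :=
    log_data.foldl
      (fun sanitized kv =>
        if !(sensitive_fields.contains kv.1) then sanitized.insert kv.1 kv.2 else sanitized)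
      PySem.Dict.empty
  sanitized.items

-- ===== PORT B =====
-- sanitized = dict(log_data); then sanitized.pop(field, None) for each blacklisted field
def sanitize_log_data_alt (log_data : List (String × String)) : List (String × String) :=
  let sanitized : PySem.Dict String String := PySem.Dict.ofList log_data
  let sanitized :=
    (["explanation", "phase", "indicators"] : List String).foldl
      (fun d field =>
        match d.pop? field with   -- d.pop(field, None): remove if present, else no-op
        | some (_, d') => d'
        | none => d)
      sanitized
  sanitized.items

-- ===== PRECONDITION & SPEC =====
def Spec_sanitize_log_data (log_data : List (String × String)) (out : List (String × String)) : Prop := out = sanitize_log_data_alt log_data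
instance (log_data : List (String × String)) (out : List (String × String)) : Decidable (Spec_sanitize_log_data log_data out) := by unfold Spec_sanitize_log_data; infer_instance

-- ===== CLAIM (what is proved, stated in full; the proofs are below) =====
def Claim_equal_sanitize_log_data : Prop := ∀ (log_data : List (String × String)), Dom_sanitize_log_data log_data → Spec_sanitize_log_data log_data (sanitize_log_data log_data)

-- ===== LEMMAS AND PROOFS =====

def pvSens : List String := ["explanation", "phase", "indicators"]
def pvPred (p : String × String) : Bool := !(p.1 == "explanation" || p.1 == "phase" || p.1 == "indicators")

theorem pvContains_eq (x : String) :
    pvSens.contains x = (x == "explanation" || x == "phase" || x == "indicators") := by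
  by_cases h1 : x = "explanation" <;> by_cases h2 : x = "phase" <;>
    by_cases h3 : x = "indicators" <;> simp [pvSens, h1, h2, h3]

theorem pvPred_eq (p : String × String) : pvPred p = !(pvSens.contains p.1) := by
  rw [pvContains_eq]; rfl

theorem pvPred_fst (p : String × String) (k : String) (v : String) (h : p.1 = k) :
    pvPred p = pvPred (k, v) := by simp [pvPred, h]

theorem pvA1 (k v : String) (hkv : pvPred (k, v) = false) (l : List (String × String)) :
    (l.map (fun p => if p.1 == k then (k, v) else p)).filter pvPred = l.filter pvPred := by
  induction l with
  | nil => rfl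
  | cons p rest ih =>
      simp only [List.map_cons, List.filter_cons]
      by_cases hp : (p.1 == k) = true
      · have h1 : pvPred p = false := (pvPred_fst p k v (eq_of_beq hp)).trans hkv
        rw [if_pos hp, if_neg (by simp [hkv]), if_neg (by simp [h1]), ih]
      · rw [if_neg hp]
        by_cases hq : pvPred p = true
        · rw [ih, if_pos hq]
        · rw [ih, if_neg hq]

theorem pvA2 (k v : String) (hkv : pvPred (k, v) = true) (l : List (String × String)) :
    (l.map (fun p => if p.1 == k then (k, v) else p)).filter pvPred
      = (l.filter pvPred).map (fun p => if p.1 == k then (k, v) else p) := by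
  induction l with
  | nil => rfl
  | cons p rest ih =>
      simp only [List.map_cons, List.filter_cons]
      by_cases hp : (p.1 == k) = true
      · have h1 : pvPred p = true := (pvPred_fst p k v (eq_of_beq hp)).trans hkv
        rw [if_pos hp, if_pos hkv, if_pos h1, List.map_cons, if_pos hp, ih]
      · rw [if_neg hp]
        by_cases hq : pvPred p = true
        · rw [ih]; simp [hq]
          intro h; exact absurd (beq_iff_eq.mpr h) hp
        · rw [ih]; simp [hq]

theorem pvA3 (k : String) (v : String) (hkv : pvPred (k, v) = true) (l : List (String × String)) :
    ((l.filter pvPred).any (fun p => p.1 == k)) = l.any (fun p => p.1 == k) := by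
  induction l with
  | nil => rfl
  | cons p rest ih =>
      rw [List.filter_cons]
      by_cases hp : (p.1 == k) = true
      · have h1 : pvPred p = true := (pvPred_fst p k v (eq_of_beq hp)).trans hkv
        rw [if_pos h1, List.any_cons, List.any_cons, ih]
      · by_cases hq : pvPred p = true
        · rw [if_pos hq, List.any_cons, List.any_cons, ih]
        · rw [if_neg hq, List.any_cons, ih]
          have hp' : (p.1 == k) = false := by cases h : (p.1 == k) with
            | true => exact absurd h hp
            | false => rfl
          rw [hp']
          simp

theorem pvContains_filter (d : PySem.Dict String String) (k : String)
    (hs : pvSens.contains k = false) :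
    (PySem.Dict.mk (d.items.filter pvPred)).contains k = d.contains k := by
  unfold PySem.Dict.contains
  have hkv : pvPred (k, "") = true := by rw [pvPred_eq, hs]; rfl
  exact pvA3 k "" hkv d.items

theorem pvFilter_insert (d : PySem.Dict String String) (k v : String) :
    (d.insert k v).items.filter pvPred
      = if pvSens.contains k then d.items.filter pvPred
        else (PySem.Dict.insert (PySem.Dict.mk (d.items.filter pvPred)) k v).items := by
  by_cases hs : pvSens.contains k = true
  · rw [if_pos hs]
    have hkv : pvPred (k, v) = false := by rw [pvPred_eq, hs]; rfl
    unfold PySem.Dict.insert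
    by_cases hc : d.contains k = true
    · rw [if_pos hc]
      exact pvA1 k v hkv d.items
    · rw [if_neg hc]
      simp only [List.filter_append]
      rw [List.filter_cons, if_neg (by simp [hkv])]
      simp
  · have hs' : pvSens.contains k = false := by
      cases h : pvSens.contains k with
      | true => exact absurd h hs
      | false => rfl
    rw [if_neg (by rw [hs']; simp)]
    have hkv : pvPred (k, v) = true := by rw [pvPred_eq, hs']; rfl
    unfold PySem.Dict.insert
    rw [pvContains_filter d k hs']
    by_cases hc : d.contains k = true
    · rw [if_pos hc, if_pos hc]
      exact pvA2 k v hkv d.items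
    · rw [if_neg hc, if_neg hc]
      simp only [List.filter_append]
      rw [List.filter_cons, if_pos hkv]
      simp

theorem pvMain (l : List (String × String)) (d : PySem.Dict String String) :
    (l.foldl
      (fun sanitized kv =>
        if !(pvSens.contains kv.1) then sanitized.insert kv.1 kv.2 else sanitized)
      (PySem.Dict.mk (d.items.filter pvPred)))
    = PySem.Dict.mk ((l.foldl (fun acc p => acc.insert p.1 p.2) d).items.filter pvPred) := by
  induction l generalizing d with
  | nil => rfl
  | cons kv rest ih =>
      simp only [List.foldl_cons]
      have h1 := pvFilter_insert d kv.1 kv.2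
      by_cases hs : pvSens.contains kv.1 = true
      · rw [if_pos hs] at h1
        rw [if_neg (by rw [hs]; simp)]
        have := ih (d.insert kv.1 kv.2)
        rw [h1] at this
        exact this
      · have hs' : pvSens.contains kv.1 = false := by
          cases h : pvSens.contains kv.1 with
          | true => exact absurd h hs
          | false => rfl
        rw [if_neg (by rw [hs']; simp)] at h1
        rw [if_pos (by rw [hs']; rfl)]
        have := ih (d.insert kv.1 kv.2)
        rw [h1] at this
        exact this

theorem pvPop_eq_erase (d : PySem.Dict String String) (f : String) :
    (match d.pop? f with
     | some (_, d') => d'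
     | none => d) = d.erase f := by
  unfold PySem.Dict.pop?
  cases hg : d.get? f with
  | some v => simp
  | none =>
      simp only [Option.map_none]
      have hc : d.contains f = false := by
        rw [PySem.Dict.contains_eq_isSome_get?, hg]; rfl
      unfold PySem.Dict.contains at hc
      have hall : ∀ p ∈ d.items, (!(p.1 == f)) = true := by
        intro p hp
        cases hb : (p.1 == f) with
        | false => rfl
        | true =>
            exfalso
            have hany : (d.items.any fun p => p.1 == f) = true :=
              List.any_eq_true.mpr ⟨p, hp, hb⟩
            rw [hany] at hc
            exact absurd hc (by decide)
      unfold PySem.Dict.erase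
      cases d with
      | mk items =>
          simp only [] at hall ⊢
          rw [List.filter_eq_self.mpr hall]

theorem pvEraseThree (d : PySem.Dict String String) :
    (((d.erase "explanation").erase "phase").erase "indicators").items
      = d.items.filter pvPred := by
  unfold PySem.Dict.erase
  simp only [List.filter_filter]
  apply List.filter_congr
  intro p _
  simp only [pvPred]
  cases h1 : (p.1 == "explanation") <;> cases h2 : (p.1 == "phase") <;>
    cases h3 : (p.1 == "indicators") <;> simp

-- ===== VERDICT (by name: the statement is the Claim_ definition above) =====
theorem sanitize_log_data_spec : Claim_equal_sanitize_log_data := by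
  intro l _
  unfold Spec_sanitize_log_data sanitize_log_data sanitize_log_data_alt
  have hB :
      ((["explanation", "phase", "indicators"] : List String).foldl
        (fun d field =>
          match d.pop? field with
          | some (_, d') => d'
          | none => d)
        (PySem.Dict.ofList l)).items
      = (PySem.Dict.ofList l).items.filter pvPred := by
    simp only [List.foldl_cons, List.foldl_nil, pvPop_eq_erase]
    exact pvEraseThree _
  exact (congrArg PySem.Dict.items (pvMain l PySem.Dict.empty)).trans hB.symm
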